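-- pv_equiv track=rewrite | github.com/wbq9224/AlgorithmCode | OtherAlgorithm/Test.py | find_key_word
-- ===== SOURCE A (Python) =====
-- def find_key_word(char_map, key_word):
--     if not char_map:
--         return 0
--     m, n = len(char_map), len(char_map[0])
--
--     res, key_word_len = 0, len(key_word)
--     for i in range(m):
--         for j in range(n - key_word_len + 1):
--             if char_map[i][j: j + key_word_len] == key_word:
--                 res += 1
--
--     trans_map = ["".join(temp) for temp in zip(*char_map)]
--     for i in range(n):
--         for j in range(m - key_word_len + 1):
--             if trans_map[i][j: j + key_word_len] == key_word:
--                 res += 1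
--
--     for i in range(m - key_word_len + 1):
--         for j in range(n - key_word_len + 1):
--             temp = char_map[i][j]
--             for k in range(1, key_word_len):
--                 temp += char_map[i + k][j + k]
--             if temp == key_word:
--                 res += 1
--     return res
-- ===== SOURCE B (Python) =====
-- def find_key_word(char_map, key_word):
--     if not char_map or not key_word:
--         return 0
--     m, n, L = len(char_map), len(char_map[0]), len(key_word)
--
--     def hits(i, j, di, dj):
--         if i + (L - 1) * di >= m or j + (L - 1) * dj >= n:
--             return 0
--         for k in range(L):
--             if char_map[i + k * di][j + k * dj] != key_word[k]:
--                 return 0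
--         return 1
--
--     res = 0
--     for i in range(m):
--         for j in range(n):
--             res += hits(i, j, 0, 1) + hits(i, j, 1, 0) + hits(i, j, 1, 1)
--     return res
-- ===== Notes on version B (the rewrite author's own statement) =====
-- stated objective: alternative
-- what changed: A makes three separate passes (row slicing, building a transposed string list for columns, concatenating a temp string per diagonal window); B is one fused scan over the cells that checks all three directions char-by-char with early exit and builds no intermediate strings.
-- outside the precondition, e.g. on find_key_word(['abab', 'a'], 'abab'): A returns 1, B raises IndexError
import Mathlib
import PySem

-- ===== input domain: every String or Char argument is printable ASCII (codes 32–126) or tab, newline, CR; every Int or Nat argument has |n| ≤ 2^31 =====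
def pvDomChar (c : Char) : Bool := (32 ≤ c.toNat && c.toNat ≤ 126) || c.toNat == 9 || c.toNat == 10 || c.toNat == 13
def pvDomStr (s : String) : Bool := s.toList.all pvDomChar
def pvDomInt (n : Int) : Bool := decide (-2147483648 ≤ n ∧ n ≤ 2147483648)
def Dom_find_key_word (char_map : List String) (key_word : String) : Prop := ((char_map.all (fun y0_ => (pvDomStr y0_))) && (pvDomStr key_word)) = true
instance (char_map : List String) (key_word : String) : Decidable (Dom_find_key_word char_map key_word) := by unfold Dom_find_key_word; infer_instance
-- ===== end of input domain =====

-- B replaces A's three passes (row slices, transposed column strings, per-window diagonal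
-- string building) by one fused per-cell scan checking the three directions char-by-char;
-- an alternative of the same asymptotic cost, proved to return the same count on Pre_.


-- ===== PORT A =====
-- exact model of Python zip(*rows): one tuple per index smaller than every row's length
-- (only indices below each row's length are ever read, so the default d is never used)
def pyZipStar {α : Type} (d : α) (rows : List (List α)) : List (List α) :=
  (List.range ((rows.map List.length).min?.getD 0)).map (fun t => rows.map (fun r => r.getD t d))

def find_key_word (char_map : List String) (key_word : String) : Int :=
  if char_map = [] then 0 else
  let grid : List (List Char) := char_map.map String.toList
  let m : Int := grid.length
  let n : Int := (grid.headD []).length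
  let kw : List Char := key_word.toList
  let L : Int := kw.length
  let res1 : Int := (PySem.List.pyRange 0 m 1).foldl (fun res i =>
    (PySem.List.pyRange 0 (n - L + 1) 1).foldl (fun res j =>
      if PySem.List.slice (PySem.List.pyGetD grid i []) (some j) (some (j + L)) = kw then res + 1 else res) res) 0
  let transMap : List (List Char) := pyZipStar ' ' grid
  let res2 : Int := (PySem.List.pyRange 0 n 1).foldl (fun res i =>
    (PySem.List.pyRange 0 (m - L + 1) 1).foldl (fun res j =>
      if PySem.List.slice (PySem.List.pyGetD transMap i []) (some j) (some (j + L)) = kw then res + 1 else res) res) res1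
  (PySem.List.pyRange 0 (m - L + 1) 1).foldl (fun res i =>
    (PySem.List.pyRange 0 (n - L + 1) 1).foldl (fun res j =>
      let temp : List Char := (PySem.List.pyRange 1 L 1).foldl
        (fun temp k => temp ++ [PySem.List.pyGetD (PySem.List.pyGetD grid (i + k) []) (j + k) ' '])
        [PySem.List.pyGetD (PySem.List.pyGetD grid i []) j ' ']
      if temp = kw then res + 1 else res) res) res2

-- ===== PORT B =====
-- the 'for k in range(L): if grid[i+k*di][j+k*dj] != key_word[k]: return 0' loop of Source B
def chkAll (grid : List (List Char)) (i j di dj : Nat) : List Char → Nat → Bool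
  | [], _ => true
  | c :: rest, k => (((grid.getD (i + k * di) []).getD (j + k * dj) ' ') == c) && chkAll grid i j di dj rest (k + 1)

def hits (grid : List (List Char)) (kw : List Char) (m n i j di dj : Nat) : Int :=
  if m ≤ i + (kw.length - 1) * di ∨ n ≤ j + (kw.length - 1) * dj then 0
  else if chkAll grid i j di dj kw 0 then 1 else 0

def find_key_word_alt (char_map : List String) (key_word : String) : Int :=
  if char_map = [] ∨ key_word = "" then 0 else
  let grid : List (List Char) := char_map.map String.toList
  let m : Nat := grid.length
  let n : Nat := (grid.headD []).length
  let kw : List Char := key_word.toList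
  (List.range m).foldl (fun res i =>
    (List.range n).foldl (fun res j =>
      res + hits grid kw m n i j 0 1 + hits grid kw m n i j 1 0 + hits grid kw m n i j 1 1) res) 0

-- ===== PRECONDITION & SPEC =====
-- Pre_ excludes exactly the inputs where A raises IndexError (a row shorter than the first row
-- reached by the column or diagonal pass, or an empty keyword on a nonempty map), plus the ragged
-- grids on which A accidentally returns only because the keyword is too long for any column or
-- diagonal access yet fits in a row, where B's per-cell indexing raises IndexError instead.
def Pre_find_key_word (char_map : List String) (key_word : String) : Prop :=
  char_map = [] ∨ (key_word ≠ "" ∧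
    ((∀ s ∈ char_map, (char_map.headD "").toList.length ≤ s.toList.length) ∨
     (char_map.length < key_word.toList.length ∧ (char_map.headD "").toList.length < key_word.toList.length)))
instance (char_map : List String) (key_word : String) : Decidable (Pre_find_key_word char_map key_word) := by
  unfold Pre_find_key_word; infer_instance

def pvWitness_find_key_word : List String × String := (["aba", "bab", "aba"], "ab")

def Spec_find_key_word (char_map : List String) (key_word : String) (out : Int) : Prop := out = find_key_word_alt char_map key_word
instance (char_map : List String) (key_word : String) (out : Int) : Decidable (Spec_find_key_word char_map key_word out) := by unfold Spec_find_key_word; infer_instance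

-- ===== CLAIM (what is proved, stated in full; the proofs are below) =====
def Claim_equal_find_key_word : Prop := ∀ (char_map : List String) (key_word : String), Dom_find_key_word char_map key_word → Pre_find_key_word char_map key_word → Spec_find_key_word char_map key_word (find_key_word char_map key_word)

-- ===== LEMMAS AND PROOFS =====

-- grid cell accessor and straight-line window used to relate the two ports
def gch (g : List (List Char)) (i j : Nat) : Char := (g.getD i []).getD j ' '

def win (g : List (List Char)) (i j di dj len : Nat) : List Char :=
  (List.range len).map (fun t => gch g (i + t * di) (j + t * dj))

lemma sumRange (f : Nat → Int) (M : Nat) : ((List.range M).map f).sum = ∑ i ∈ Finset.range M, f i := by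
  induction M with
  | zero => simp
  | succ M ih => rw [List.range_succ, List.map_append, List.sum_append, Finset.sum_range_succ, ih]; simp

lemma countPsum (l : List Int) (p : Int → Bool) :
    ((l.countP p : Nat) : Int) = (l.map (fun x => if p x then (1:Int) else 0)).sum := by
  induction l with
  | nil => simp
  | cons x l ih =>
    rw [List.countP_cons]
    simp only [List.map_cons, List.sum_cons, ← ih]
    split_ifs <;> (push_cast; ring)

lemma doubleLoop (K1 K2 : Int) (q : Int → Int → Prop) [inst : ∀ i j, Decidable (q i j)] (init : Int) :
    (PySem.List.pyRange 0 K1 1).foldl (fun res i =>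
      (PySem.List.pyRange 0 K2 1).foldl (fun res j => if q i j then res + 1 else res) res) init
    = init + ∑ i ∈ Finset.range K1.toNat, ∑ j ∈ Finset.range K2.toNat, (if q i j then (1:Int) else 0) := by
  simp only [PySem.List.foldl_ite_add_one, PySem.List.foldl_add]
  rw [PySem.List.pyRange_one 0 K1]
  simp only [List.map_map, sub_zero, zero_add, Function.comp_def]
  rw [sumRange]
  congr 1
  refine Finset.sum_congr rfl fun i _ => ?_
  rw [countPsum, PySem.List.pyRange_one 0 K2]
  simp only [List.map_map, sub_zero, zero_add, Function.comp_def]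
  rw [sumRange]
  exact Finset.sum_congr rfl fun j _ => by simp

lemma doubleLoopB (M N : Nat) (f1 f2 f3 : Nat → Nat → Int) (init : Int) :
    (List.range M).foldl (fun res i =>
      (List.range N).foldl (fun res j => res + f1 i j + f2 i j + f3 i j) res) init
    = init + ∑ i ∈ Finset.range M, ∑ j ∈ Finset.range N, (f1 i j + f2 i j + f3 i j) := by
  simp only [add_assoc, PySem.List.foldl_add]
  rw [sumRange]
  congr 1

lemma sum_restrict (f : Nat → Int) {a b : Nat} (h : a ≤ b) (h0 : ∀ j, a ≤ j → j < b → f j = 0) :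
    ∑ j ∈ Finset.range b, f j = ∑ j ∈ Finset.range a, f j := by
  refine (Finset.sum_subset ?_ ?_).symm
  · intro x hx; simp at hx ⊢; omega
  · intro x hx hnx
    simp at hx hnx
    exact h0 x (by omega) hx

lemma windowEq (row : List Char) (j L : Nat) (h : j + L ≤ row.length) :
    (row.drop j).take L = (List.range L).map (fun t => row.getD (j + t) ' ') := by
  apply List.ext_getElem
  · simp; omega
  · intro t h1 h2
    have ht : t < L := by simpa using h2
    have hjt : j + t < row.length := by omega
    simp [List.getElem_take, List.getElem_drop, List.getD_eq_getElem?_getD,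
      List.getElem?_eq_getElem hjt]

lemma minHead (g : List (List Char)) (nn : Nat) (hg : g ≠ []) (hhead : (g.headD []).length = nn)
    (H : ∀ r ∈ g, nn ≤ r.length) : ((g.map List.length).min?.getD 0) = nn := by
  match g with
  | [] => exact absurd rfl hg
  | r0 :: rest =>
    have h0 : r0.length = nn := by simpa using hhead
    have hmin : ((r0 :: rest).map List.length).min? = some nn := by
      rw [List.min?_eq_some_iff]
      constructor
      · simp [← h0]
      · intro b hb
        simp at hb
        rcases hb with h1 | ⟨r, hr, hrb⟩
        · omega
        · rw [← hrb]; exact H r (by simp [hr])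
    rw [hmin]
    rfl

lemma transGetD (g : List (List Char)) (nn : Nat) (hg : g ≠ []) (hhead : (g.headD []).length = nn)
    (H : ∀ r ∈ g, nn ≤ r.length) (i : Nat) (hi : i < nn) :
    (pyZipStar ' ' g).getD i [] = g.map (fun r => r.getD i ' ') := by
  unfold pyZipStar
  rw [minHead g nn hg hhead H]
  simp [List.getD_eq_getElem?_getD, hi]

lemma chkAll_iff (g : List (List Char)) (i j di dj : Nat) (pat : List Char) :
    ∀ k, chkAll g i j di dj pat k = true ↔
      (List.range pat.length).map (fun t => gch g (i + (k + t) * di) (j + (k + t) * dj)) = pat := by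
  induction pat with
  | nil => intro k; simp [chkAll]
  | cons c rest ih =>
    intro k
    rw [chkAll]
    have harr : ∀ t : Nat, k + 1 + t = k + (t + 1) := fun t => by omega
    simp only [Bool.and_eq_true, beq_iff_eq, ih (k + 1), List.length_cons,
      List.range_succ_eq_map, List.map_cons, List.map_map, Function.comp_def,
      Nat.succ_eq_add_one, List.cons.injEq, Nat.add_zero, gch, harr]

lemma chkAll_zero_iff (g : List (List Char)) (i j di dj : Nat) (pat : List Char) :
    chkAll g i j di dj pat 0 = true ↔ win g i j di dj pat.length = pat := by
  rw [chkAll_iff]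
  unfold win
  simp only [Nat.zero_add]

lemma termA1 (g : List (List Char)) (kw : List Char) (nn : Nat)
    (H : ∀ r ∈ g, nn ≤ r.length) (i : Nat) (him : i < g.length) (j : Nat)
    (hj : j + kw.length ≤ nn) :
    (PySem.List.slice (PySem.List.pyGetD g (i:Int) []) (some (j:Int)) (some ((j:Int) + (kw.length:Int))) = kw)
      ↔ (win g i j 0 1 kw.length = kw) := by
  simp only [PySem.List.pyGetD_natCast]
  rw [List.getD_eq_getElem _ _ him]
  have hlen : nn ≤ g[i].length := H _ (List.getElem_mem him)
  rw [PySem.List.slice_natCast_add, windowEq _ _ _ (by omega : j + kw.length ≤ g[i].length)]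
  have hw : win g i j 0 1 kw.length = (List.range kw.length).map (fun t => g[i].getD (j + t) ' ') := by
    unfold win gch
    refine List.map_congr_left fun t _ => ?_
    rw [Nat.mul_zero, Nat.add_zero, Nat.mul_one, List.getD_eq_getElem _ _ him]
  rw [hw]

lemma termA2 (g : List (List Char)) (kw : List Char) (nn : Nat) (hg : g ≠ [])
    (hhead : (g.headD []).length = nn) (H : ∀ r ∈ g, nn ≤ r.length)
    (i : Nat) (hi : i < nn) (j : Nat) (hj : j + kw.length ≤ g.length) :
    (PySem.List.slice (PySem.List.pyGetD (pyZipStar ' ' g) (i:Int) []) (some (j:Int)) (some ((j:Int) + (kw.length:Int))) = kw)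
      ↔ (win g j i 1 0 kw.length = kw) := by
  simp only [PySem.List.pyGetD_natCast]
  rw [transGetD g nn hg hhead H i hi]
  have hlen : j + kw.length ≤ (g.map (fun r => r.getD i ' ')).length := by
    simpa using hj
  rw [PySem.List.slice_natCast_add, windowEq _ _ _ hlen]
  have hw : win g j i 1 0 kw.length
      = (List.range kw.length).map (fun t => (g.map (fun r => r.getD i ' ')).getD (j + t) ' ') := by
    unfold win gch
    refine List.map_congr_left fun t ht => ?_
    have htl : t < kw.length := by simpa using ht
    have hjt : j + t < g.length := by omega
    simp only [Nat.mul_one, Nat.mul_zero, Nat.add_zero]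
    rw [List.getD_eq_getElem _ _ hjt,
      List.getD_eq_getElem _ _ (show j + t < (g.map (fun r => r.getD i ' ')).length by simpa using hjt),
      List.getElem_map]
  rw [hw]

lemma termA3 (g : List (List Char)) (kw : List Char) (hL : 1 ≤ kw.length) (i j : Nat) :
    ((PySem.List.pyRange 1 (kw.length:Int) 1).foldl
        (fun temp k => temp ++ [PySem.List.pyGetD (PySem.List.pyGetD g ((i:Int) + k) []) ((j:Int) + k) ' '])
        [PySem.List.pyGetD (PySem.List.pyGetD g (i:Int) []) (j:Int) ' '] = kw)
      ↔ (win g i j 1 1 kw.length = kw) := by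
  rw [PySem.List.foldl_append_singleton_eq_map, PySem.List.pyRange_one 1 (kw.length:Int), List.map_map]
  have hc1 : ∀ k : Nat, ((i:Int) + ((1:Int) + (k:Int))) = (((i + 1 + k : Nat)) : Int) := by
    intro k; push_cast; ring
  have hc2 : ∀ k : Nat, ((j:Int) + ((1:Int) + (k:Int))) = (((j + 1 + k : Nat)) : Int) := by
    intro k; push_cast; ring
  have hT : ((kw.length : Int) - 1).toNat = kw.length - 1 := by omega
  simp only [Function.comp_def, hc1, hc2, PySem.List.pyGetD_natCast, hT]
  have hlist : ([(g.getD i []).getD j ' '] : List Char)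
      ++ (List.range (kw.length - 1)).map (fun k => (g.getD (i + 1 + k) []).getD (j + 1 + k) ' ')
      = win g i j 1 1 kw.length := by
    unfold win gch
    rw [show kw.length = (kw.length - 1) + 1 from by omega, List.range_succ_eq_map,
      List.map_cons, List.map_map]
    simp only [Function.comp_def, Nat.succ_eq_add_one, Nat.add_zero, Nat.mul_one,
      List.cons_append, List.nil_append]
    congr 1
    refine List.map_congr_left fun t ht => ?_
    rw [show i + 1 + t = i + (t + 1) from by omega, show j + 1 + t = j + (t + 1) from by omega]
  rw [hlist]

lemma termB1 (g : List (List Char)) (kw : List Char) (nn : Nat) (hL : 1 ≤ kw.length)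
    (i : Nat) (him : i < g.length) :
    ∑ j ∈ Finset.range nn, hits g kw g.length nn i j 0 1
      = ∑ j ∈ Finset.range (((nn:Int) - kw.length + 1).toNat),
          (if win g i j 0 1 kw.length = kw then (1:Int) else 0) := by
  rw [sum_restrict _ (by omega : ((nn:Int) - kw.length + 1).toNat ≤ nn)]
  · refine Finset.sum_congr rfl fun j hj => ?_
    have hjb : j < ((nn:Int) - kw.length + 1).toNat := by simpa using hj
    unfold hits
    rw [if_neg (by simp only [not_or, not_le]; constructor <;> omega)]
    exact if_congr (chkAll_zero_iff g i j 0 1 kw) rfl rfl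
  · intro j h1 h2
    unfold hits
    rw [if_pos]
    right; omega

lemma termB2 (g : List (List Char)) (kw : List Char) (nn : Nat) (hL : 1 ≤ kw.length)
    (j : Nat) (hj : j < nn) :
    ∑ i ∈ Finset.range g.length, hits g kw g.length nn i j 1 0
      = ∑ i ∈ Finset.range (((g.length:Int) - kw.length + 1).toNat),
          (if win g i j 1 0 kw.length = kw then (1:Int) else 0) := by
  rw [sum_restrict _ (by omega : ((g.length:Int) - kw.length + 1).toNat ≤ g.length)]
  · refine Finset.sum_congr rfl fun i hi => ?_
    have hib : i < ((g.length:Int) - kw.length + 1).toNat := by simpa using hi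
    unfold hits
    rw [if_neg (by simp only [not_or, not_le]; constructor <;> omega)]
    exact if_congr (chkAll_zero_iff g i j 1 0 kw) rfl rfl
  · intro i h1 h2
    unfold hits
    rw [if_pos]
    left; omega

lemma termB3 (g : List (List Char)) (kw : List Char) (nn : Nat) (hL : 1 ≤ kw.length) :
    ∑ i ∈ Finset.range g.length, ∑ j ∈ Finset.range nn, hits g kw g.length nn i j 1 1
      = ∑ i ∈ Finset.range (((g.length:Int) - kw.length + 1).toNat),
          ∑ j ∈ Finset.range (((nn:Int) - kw.length + 1).toNat),
            (if win g i j 1 1 kw.length = kw then (1:Int) else 0) := by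
  rw [sum_restrict _ (by omega : ((g.length:Int) - kw.length + 1).toNat ≤ g.length)]
  · refine Finset.sum_congr rfl fun i hi => ?_
    have hib : i < ((g.length:Int) - kw.length + 1).toNat := by simpa using hi
    rw [sum_restrict _ (by omega : ((nn:Int) - kw.length + 1).toNat ≤ nn)]
    · refine Finset.sum_congr rfl fun jj hjm => ?_
      have hjb : jj < ((nn:Int) - kw.length + 1).toNat := by simpa using hjm
      unfold hits
      rw [if_neg (by simp only [not_or, not_le]; constructor <;> omega)]
      exact if_congr (chkAll_zero_iff g i jj 1 1 kw) rfl rfl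
    · intro jj h1 h2
      unfold hits
      rw [if_pos]
      right; omega
  · intro i h1 h2
    refine Finset.sum_eq_zero fun jj _ => ?_
    unfold hits
    rw [if_pos]
    left; omega

lemma coreEq (g : List (List Char)) (kw : List Char) (nn : Nat)
    (hL : 1 ≤ kw.length)
    (hcase : (∀ r ∈ g, nn ≤ r.length) ∨ (g.length < kw.length ∧ nn < kw.length))
    (hgne : g ≠ []) (hghead : (g.headD []).length = nn) :
    (PySem.List.pyRange 0 ((g.length:Int) - kw.length + 1) 1).foldl
      (fun res i =>
        (PySem.List.pyRange 0 ((nn:Int) - kw.length + 1) 1).foldl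
          (fun res j =>
            if (PySem.List.pyRange 1 (kw.length:Int) 1).foldl
                (fun temp k => temp ++ [PySem.List.pyGetD (PySem.List.pyGetD g (i + k) []) (j + k) ' '])
                [PySem.List.pyGetD (PySem.List.pyGetD g i []) j ' '] = kw
            then res + 1 else res) res)
      ((PySem.List.pyRange 0 (nn:Int) 1).foldl
        (fun res i =>
          (PySem.List.pyRange 0 ((g.length:Int) - kw.length + 1) 1).foldl
            (fun res j =>
              if PySem.List.slice (PySem.List.pyGetD (pyZipStar ' ' g) i []) (some j) (some (j + (kw.length:Int))) = kw
              then res + 1 else res) res)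
        ((PySem.List.pyRange 0 (g.length:Int) 1).foldl
          (fun res i =>
            (PySem.List.pyRange 0 ((nn:Int) - kw.length + 1) 1).foldl
              (fun res j =>
                if PySem.List.slice (PySem.List.pyGetD g i []) (some j) (some (j + (kw.length:Int))) = kw
                then res + 1 else res) res)
          0))
    = (List.range g.length).foldl
        (fun res i =>
          (List.range nn).foldl
            (fun res j =>
              res + hits g kw g.length nn i j 0 1 + hits g kw g.length nn i j 1 0
                + hits g kw g.length nn i j 1 1) res)
        0 := by
  rw [doubleLoop, doubleLoop, doubleLoop, doubleLoopB]
  simp only [Int.toNat_natCast]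
  rcases hcase with hsh | ⟨hm, hn⟩
  · -- every row at least as long as the first one
    have H : ∀ r ∈ g, nn ≤ r.length := hsh
    have e1 : ∑ i ∈ Finset.range g.length, ∑ j ∈ Finset.range (((nn:Int) - kw.length + 1).toNat),
          (if PySem.List.slice (PySem.List.pyGetD g (i:Int) []) (some (j:Int)) (some ((j:Int) + (kw.length:Int))) = kw then (1:Int) else 0)
        = ∑ i ∈ Finset.range g.length, ∑ j ∈ Finset.range (((nn:Int) - kw.length + 1).toNat),
          (if win g i j 0 1 kw.length = kw then (1:Int) else 0) :=
      Finset.sum_congr rfl fun i hi => Finset.sum_congr rfl fun j hj =>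
        if_congr (termA1 g kw nn H i (by simpa using hi) j
          (by have := Finset.mem_range.mp hj; omega)) rfl rfl
    have e2 : ∑ i ∈ Finset.range nn, ∑ j ∈ Finset.range (((g.length:Int) - kw.length + 1).toNat),
          (if PySem.List.slice (PySem.List.pyGetD (pyZipStar ' ' g) (i:Int) []) (some (j:Int)) (some ((j:Int) + (kw.length:Int))) = kw then (1:Int) else 0)
        = ∑ i ∈ Finset.range nn, ∑ j ∈ Finset.range (((g.length:Int) - kw.length + 1).toNat),
          (if win g j i 1 0 kw.length = kw then (1:Int) else 0) :=
      Finset.sum_congr rfl fun i hi => Finset.sum_congr rfl fun j hj =>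
        if_congr (termA2 g kw nn hgne hghead H i (by simpa using hi) j
          (by have := Finset.mem_range.mp hj; omega)) rfl rfl
    have e3 : ∑ i ∈ Finset.range (((g.length:Int) - kw.length + 1).toNat),
          ∑ j ∈ Finset.range (((nn:Int) - kw.length + 1).toNat),
          (if (PySem.List.pyRange 1 (kw.length:Int) 1).foldl
              (fun temp k => temp ++ [PySem.List.pyGetD (PySem.List.pyGetD g ((i:Int) + k) []) ((j:Int) + k) ' '])
              [PySem.List.pyGetD (PySem.List.pyGetD g (i:Int) []) (j:Int) ' '] = kw then (1:Int) else 0)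
        = ∑ i ∈ Finset.range (((g.length:Int) - kw.length + 1).toNat),
          ∑ j ∈ Finset.range (((nn:Int) - kw.length + 1).toNat),
          (if win g i j 1 1 kw.length = kw then (1:Int) else 0) :=
      Finset.sum_congr rfl fun i _ => Finset.sum_congr rfl fun j _ =>
        if_congr (termA3 g kw hL i j) rfl rfl
    have hB1 : ∑ i ∈ Finset.range g.length, ∑ j ∈ Finset.range nn, hits g kw g.length nn i j 0 1
        = ∑ i ∈ Finset.range g.length, ∑ j ∈ Finset.range (((nn:Int) - kw.length + 1).toNat),
          (if win g i j 0 1 kw.length = kw then (1:Int) else 0) :=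
      Finset.sum_congr rfl fun i hi => termB1 g kw nn hL i (by simpa using hi)
    have hB2 : ∑ i ∈ Finset.range g.length, ∑ j ∈ Finset.range nn, hits g kw g.length nn i j 1 0
        = ∑ i ∈ Finset.range nn, ∑ j ∈ Finset.range (((g.length:Int) - kw.length + 1).toNat),
          (if win g j i 1 0 kw.length = kw then (1:Int) else 0) := by
      rw [Finset.sum_comm]
      exact Finset.sum_congr rfl fun j hj => termB2 g kw nn hL j (by simpa using hj)
    have hB3 : ∑ i ∈ Finset.range g.length, ∑ j ∈ Finset.range nn, hits g kw g.length nn i j 1 1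
        = ∑ i ∈ Finset.range (((g.length:Int) - kw.length + 1).toNat),
          ∑ j ∈ Finset.range (((nn:Int) - kw.length + 1).toNat),
          (if win g i j 1 1 kw.length = kw then (1:Int) else 0) :=
      termB3 g kw nn hL
    rw [e1, e2, e3]
    have hsplit : ∑ i ∈ Finset.range g.length, ∑ j ∈ Finset.range nn,
          (hits g kw g.length nn i j 0 1 + hits g kw g.length nn i j 1 0 + hits g kw g.length nn i j 1 1)
        = (∑ i ∈ Finset.range g.length, ∑ j ∈ Finset.range nn, hits g kw g.length nn i j 0 1)
          + (∑ i ∈ Finset.range g.length, ∑ j ∈ Finset.range nn, hits g kw g.length nn i j 1 0)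
          + (∑ i ∈ Finset.range g.length, ∑ j ∈ Finset.range nn, hits g kw g.length nn i j 1 1) := by
      simp [Finset.sum_add_distrib]
    rw [hsplit, hB1, hB2, hB3]
    ring
  · -- keyword longer than both dimensions: every sum is empty / every hit is 0
    have z1 : (((nn:Int) - kw.length + 1)).toNat = 0 := by omega
    have z2 : (((g.length:Int) - kw.length + 1)).toNat = 0 := by omega
    rw [z1, z2]
    have hz : ∀ i j : Nat,
        hits g kw g.length nn i j 0 1 + hits g kw g.length nn i j 1 0 + hits g kw g.length nn i j 1 1 = 0 := by
      intro i j
      unfold hits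
      rw [if_pos (Or.inr (by omega)), if_pos (Or.inl (by omega)), if_pos (Or.inl (by omega))]
      ring
    simp [hz]

lemma ports_agree (char_map : List String) (key_word : String)
    (hpre : Pre_find_key_word char_map key_word) :
    find_key_word char_map key_word = find_key_word_alt char_map key_word := by
  match char_map with
  | [] => simp [find_key_word, find_key_word_alt]
  | c0 :: rest =>
    rcases hpre with hnil | ⟨hkw, hcase⟩
    · exact absurd hnil (by simp)
    have hkl : key_word.toList ≠ [] := fun h => hkw (String.toList_eq_nil_iff.mp h)
    have hL : 1 ≤ key_word.toList.length := List.length_pos_of_ne_nil hkl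
    unfold find_key_word find_key_word_alt
    rw [if_neg (by simp : ¬(c0 :: rest = ([] : List String))),
      if_neg (by simp [hkw] : ¬((c0 :: rest : List String) = [] ∨ key_word = ""))]
    simp only [List.headD_cons, List.map_cons]
    have hcase' : (∀ r ∈ (c0.toList :: List.map String.toList rest : List (List Char)), c0.toList.length ≤ r.length)
        ∨ ((c0.toList :: List.map String.toList rest : List (List Char)).length < key_word.toList.length
            ∧ c0.toList.length < key_word.toList.length) := by
      rcases hcase with h | ⟨h1, h2⟩
      · left
        intro r hr
        rcases List.mem_cons.mp hr with rfl | hr'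
        · exact le_refl _
        · obtain ⟨s, hs, rfl⟩ := List.mem_map.mp hr'
          simpa using h s (List.mem_cons_of_mem _ hs)
      · right
        exact ⟨by simpa using h1, by simpa using h2⟩
    exact coreEq (c0.toList :: List.map String.toList rest) key_word.toList c0.toList.length hL hcase' (by simp) rfl

-- ===== VERDICT (by name: the statement is the Claim_ definition above) =====
theorem find_key_word_spec : Claim_equal_find_key_word := by
  intro char_map key_word _hdom hpre
  exact ports_agree char_map key_word hpre
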